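-- pv_equiv track=rewrite | github.com/Thernn88/SAPPHYRE | merge_overlap.py | calculate_split
-- ===== SOURCE A (Python) =====
-- from typing import Union
--
-- def get_start_end(sequence: str) -> tuple:
--     """
--     Returns index of first and last none dash character in sequence.
--     """
--     start = None
--     end = None
--     for i, character in enumerate(sequence):
--         if character != "-":
--             start = i
--             break
--     for i in range(len(sequence) - 1, -1, -1):
--         if sequence[i] != "-":
--             end = i
--             break
--     return (start, end)
--
-- def find_overlap(tuple_a: tuple, tuple_b: tuple) -> Union[tuple, None]:
--     """
--     Takes two start/end pairs and returns the overlap.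
--     """
--     start = max(tuple_a[0], tuple_b[0])
--     end = min(tuple_a[1], tuple_b[1])
--     if end - start < 0:
--         return None, None
--     return start, end
--
-- def calculate_split(sequence_a: str, sequence_b: str, comparison_sequence: str) -> int:
--     """
--     Iterates over each position in the overlap range of sequence A and sequence B and
--     creates a frankenstein sequence of sequence A + Sequence B joined at each
--     position in the overlap.
--
--     Final split position = pos in overlap with highest score.
--
--     Score is determined by the amount of characters that are the same between each
--     position in the frankenstein sequence and the comparison sequence.
--     """
--
--     pair_a = get_start_end(sequence_a)
--     pair_b = get_start_end(sequence_b)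
--
--     overlap_start, overlap_end = find_overlap(pair_a, pair_b)
--
--     sequence_a_overlap = sequence_a[overlap_start : overlap_end + 1]
--     sequence_b_overlap = sequence_b[overlap_start : overlap_end + 1]
--     comparison_overlap = comparison_sequence[overlap_start : overlap_end + 1]
--
--     highest_score = 0
--     base_score = 0
--     highest_scoring_pos = 0
--
--     for i, character in enumerate(sequence_b_overlap):
--         if character == comparison_overlap[i]:
--             base_score += 1
--     highest_score = base_score
--
--     for i, character_a in enumerate(sequence_a_overlap):
--         if sequence_b_overlap[i] == comparison_overlap[i]:
--             base_score -= 1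
--         if character_a == comparison_overlap[i]:
--             base_score += 1
--         if base_score >= highest_score:
--             highest_score = base_score
--             highest_scoring_pos = i
--     return highest_scoring_pos + overlap_start
-- ===== SOURCE B (Python) =====
-- def _first_non_dash(s):
--     return next((i for i, ch in enumerate(s) if ch != "-"), None)
--
--
-- def _last_non_dash(s):
--     r = next((i for i, ch in enumerate(reversed(s)) if ch != "-"), None)
--     return None if r is None else len(s) - 1 - r
--
--
-- def calculate_split(sequence_a: str, sequence_b: str, comparison_sequence: str) -> int:
--     start = max(_first_non_dash(sequence_a), _first_non_dash(sequence_b))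
--     stop = min(_last_non_dash(sequence_a), _last_non_dash(sequence_b)) + 1
--
--     a_ov = sequence_a[start:stop]
--     b_ov = sequence_b[start:stop]
--     c_ov = comparison_sequence[start:stop]
--
--     # pref[i] = matches of a_ov[:i+1] against c_ov (running prefix counts)
--     pref = []
--     acc = 0
--     for x, y in zip(a_ov, c_ov):
--         acc += x == y
--         pref.append(acc)
--
--     # suf[i] = matches of b_ov[i+1:] against c_ov[i+1:] (suffix counts)
--     suf = []
--     acc = 0
--     for x, y in reversed(list(zip(b_ov, c_ov))):
--         suf.append(acc)
--         acc += x == y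
--     suf.reverse()
--     total_b = acc
--
--     # split at the LAST position whose score reaches the all-B baseline
--     best, best_pos = total_b, 0
--     for i, (p, s) in enumerate(zip(pref, suf)):
--         if p + s >= best:
--             best, best_pos = p + s, i
--     return best_pos + start
-- ===== Notes on version B (the rewrite author's own statement) =====
-- stated objective: alternative
-- what changed: A's single running frankenstein-score loop (mutating base_score in place) is replaced by two cumulative match arrays -- prefix A-matches and suffix B-matches over the overlap -- combined in a separate last-argmax pass, with the break-scans for the first/last non-dash character replaced by generator/findIdx-style helpers.
import Mathlib
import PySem

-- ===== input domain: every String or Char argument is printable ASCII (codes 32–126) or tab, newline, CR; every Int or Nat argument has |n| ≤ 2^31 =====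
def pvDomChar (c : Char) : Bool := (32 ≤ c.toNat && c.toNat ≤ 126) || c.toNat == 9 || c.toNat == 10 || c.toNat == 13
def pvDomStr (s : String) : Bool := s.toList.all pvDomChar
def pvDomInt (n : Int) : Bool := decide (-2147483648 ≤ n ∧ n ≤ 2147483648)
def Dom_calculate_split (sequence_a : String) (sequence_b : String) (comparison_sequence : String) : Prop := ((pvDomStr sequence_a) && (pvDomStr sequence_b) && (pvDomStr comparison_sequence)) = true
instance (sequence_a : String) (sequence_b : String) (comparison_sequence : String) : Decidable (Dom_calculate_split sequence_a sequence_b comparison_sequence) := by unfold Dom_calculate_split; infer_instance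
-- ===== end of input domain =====

-- B replaces A's single running-score loop by two cumulative match arrays (prefix A-matches,
-- suffix B-matches) combined in a final last-argmax pass: a different decomposition, same cost.

-- ===== PORT A =====
-- get_start_end, first loop: for i, ch in enumerate(sequence): if ch != '-': start = i; break
def pvAFirst : List Char → Int → Option Int
  | [], _ => none
  | ch :: t, i => if ch ≠ '-' then some i else pvAFirst t (i + 1)

-- get_start_end, second loop: for i in range(len(sequence)-1, -1, -1): if sequence[i] != '-': end = i; break
def pvABack (s : List Char) : List Int → Option Int
  | [] => none
  | i :: rest =>
    match PySem.List.pyGet? s i with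
    | some ch => if ch ≠ '-' then some i else pvABack s rest
    | none => none   -- IndexError; never reached (range indices are in bounds)

def pvGetStartEnd (s : List Char) : Option Int × Option Int :=
  (pvAFirst s 0, pvABack s (PySem.List.pyRange ((s.length : Int) - 1) (-1) (-1)))

-- body of A's first scoring loop (indexing comparison_overlap[i]; none = IndexError, excluded by Pre_)
def pvAStep1 (cov : List Char) (acc : Int) (ic : Int × Char) : Int :=
  match PySem.List.pyGet? cov ic.1 with
  | some y => if ic.2 = y then acc + 1 else acc
  | none => acc

-- body of A's second scoring loop; state = (base_score, highest_score, highest_scoring_pos)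
def pvAStep2 (bov cov : List Char) (st : Int × Int × Int) (ic : Int × Char) : Int × Int × Int :=
  let base1 :=
    match PySem.List.pyGet? bov ic.1, PySem.List.pyGet? cov ic.1 with
    | some x, some y => if x = y then st.1 - 1 else st.1
    | _, _ => st.1   -- IndexError; excluded by Pre_
  let base2 :=
    match PySem.List.pyGet? cov ic.1 with
    | some y => if ic.2 = y then base1 + 1 else base1
    | none => base1  -- IndexError; excluded by Pre_
  if base2 ≥ st.2.1 then (base2, base2, ic.1) else (base2, st.2.1, st.2.2)

def calculate_split (sequence_a : String) (sequence_b : String) (comparison_sequence : String) : Int :=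
  let pair_a := pvGetStartEnd sequence_a.toList
  let pair_b := pvGetStartEnd sequence_b.toList
  match pair_a.1, pair_a.2, pair_b.1, pair_b.2 with
  | some sa, some ea, some sb, some eb =>
    let overlap_start := max sa sb
    let overlap_end := min ea eb
    if overlap_end - overlap_start < 0 then 0   -- Python: find_overlap yields (None, None), then None+1 raises TypeError; excluded by Pre_
    else
      let aov := PySem.List.slice sequence_a.toList (some overlap_start) (some (overlap_end + 1))
      let bov := PySem.List.slice sequence_b.toList (some overlap_start) (some (overlap_end + 1))
      let cov := PySem.List.slice comparison_sequence.toList (some overlap_start) (some (overlap_end + 1))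
      let base0 := (PySem.List.enumerate bov 0).foldl (pvAStep1 cov) 0
      let res := (PySem.List.enumerate aov 0).foldl (pvAStep2 bov cov) (base0, base0, 0)
      res.2.2 + overlap_start
  | _, _, _, _ => 0   -- Python: max/min with a None argument raises TypeError; excluded by Pre_

-- ===== PORT B =====
-- next((i for i, ch in enumerate(s) if ch != '-'), None)
def pvBFirst (l : List Char) : Option Nat := l.findIdx? (fun ch => ch ≠ '-')

-- scan of reversed(s), then len(s)-1-r
def pvBLast (l : List Char) : Option Nat :=
  (l.reverse.findIdx? (fun ch => ch ≠ '-')).map (fun r => l.length - 1 - r)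

-- for x, y in zip(a_ov, c_ov): acc += x == y; pref.append(acc)
def pvBStepPref (st : Int × List Int) (xy : Char × Char) : Int × List Int :=
  (st.1 + (if xy.1 = xy.2 then 1 else 0), st.2 ++ [st.1 + (if xy.1 = xy.2 then 1 else 0)])

-- for x, y in reversed(list(zip(b_ov, c_ov))): suf.append(acc); acc += x == y
def pvBStepSuf (st : Int × List Int) (xy : Char × Char) : Int × List Int :=
  (st.1 + (if xy.1 = xy.2 then 1 else 0), st.2 ++ [st.1])

-- for i, (p, s) in enumerate(zip(pref, suf)): if p + s >= best: best, best_pos = p + s, i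
def pvBStepMax (st : Int × Int) (ips : Int × (Int × Int)) : Int × Int :=
  if ips.2.1 + ips.2.2 ≥ st.1 then (ips.2.1 + ips.2.2, ips.1) else st

def calculate_split_alt (sequence_a : String) (sequence_b : String) (comparison_sequence : String) : Int :=
  match pvBFirst sequence_a.toList, pvBLast sequence_a.toList, pvBFirst sequence_b.toList, pvBLast sequence_b.toList with
  | some fa, some la, some fb, some lb =>
    let start : Int := max (fa : Int) (fb : Int)
    let stop : Int := min (la : Int) (lb : Int) + 1
    let aov := PySem.List.slice sequence_a.toList (some start) (some stop)
    let bov := PySem.List.slice sequence_b.toList (some start) (some stop)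
    let cov := PySem.List.slice comparison_sequence.toList (some start) (some stop)
    let pref := ((aov.zip cov).foldl pvBStepPref (0, [])).2
    let sufSt := ((bov.zip cov).reverse).foldl pvBStepSuf (0, [])
    let suf := sufSt.2.reverse
    let total_b := sufSt.1
    let res := (PySem.List.enumerate (pref.zip suf) 0).foldl pvBStepMax (total_b, 0)
    res.2 + start
  | _, _, _, _ => 0   -- Python: max(None, …) raises TypeError; excluded by Pre_

-- ===== PRECONDITION & SPEC =====
-- Pre_ excludes exactly the inputs where Python A raises: a TypeError when a sequence is empty or
-- all dashes or the two spans do not overlap (None arithmetic/slicing), and an IndexError when the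
-- comparison sequence is shorter than the overlap end.
def Pre_calculate_split (sequence_a : String) (sequence_b : String) (comparison_sequence : String) : Prop :=
  (pvBFirst sequence_a.toList).isSome = true ∧ (pvBFirst sequence_b.toList).isSome = true ∧
  max ((pvBFirst sequence_a.toList).getD 0) ((pvBFirst sequence_b.toList).getD 0)
    ≤ min ((pvBLast sequence_a.toList).getD 0) ((pvBLast sequence_b.toList).getD 0) ∧
  min ((pvBLast sequence_a.toList).getD 0) ((pvBLast sequence_b.toList).getD 0) < comparison_sequence.toList.length

instance (sequence_a : String) (sequence_b : String) (comparison_sequence : String) : Decidable (Pre_calculate_split sequence_a sequence_b comparison_sequence) := by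
  unfold Pre_calculate_split; infer_instance

def pvWitness_calculate_split : String × String × String := ("AB", "BB", "AB")

def Spec_calculate_split (sequence_a : String) (sequence_b : String) (comparison_sequence : String) (out : Int) : Prop := out = calculate_split_alt sequence_a sequence_b comparison_sequence
instance (sequence_a : String) (sequence_b : String) (comparison_sequence : String) (out : Int) : Decidable (Spec_calculate_split sequence_a sequence_b comparison_sequence out) := by unfold Spec_calculate_split; infer_instance

-- ===== CLAIM (what is proved, stated in full; the proofs are below) =====
def Claim_equal_calculate_split : Prop := ∀ (sequence_a : String) (sequence_b : String) (comparison_sequence : String), Dom_calculate_split sequence_a sequence_b comparison_sequence → Pre_calculate_split sequence_a sequence_b comparison_sequence → Spec_calculate_split sequence_a sequence_b comparison_sequence (calculate_split sequence_a sequence_b comparison_sequence)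

-- ===== LEMMAS AND PROOFS =====

theorem pvAFirst_eq (s : List Char) (k : Int) :
    pvAFirst s k = (s.findIdx? (fun ch => ch ≠ '-')).map (fun n => k + (n : Int)) := by
  induction s generalizing k with
  | nil => simp [pvAFirst]
  | cons ch t ih =>
    by_cases h : ch = '-'
    · simp [pvAFirst, h, List.findIdx?_cons, ih]
      cases List.findIdx? (fun ch => !decide (ch = '-')) t
      · simp
      · simp; ring
    · simp [pvAFirst, h, List.findIdx?_cons]
theorem pvABack_congr (r : List Int) (s ex : List Char)
    (h : ∀ i ∈ r, 0 ≤ i ∧ i < (s.length : Int)) :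
    pvABack (s ++ ex) r = pvABack s r := by
  induction r with
  | nil => rfl
  | cons i rest ih =>
    obtain ⟨h0, hl⟩ := h i (by simp)
    have hget : PySem.List.pyGet? (s ++ ex) i = PySem.List.pyGet? s i := by
      rw [PySem.List.pyGet?_of_nonneg _ h0, PySem.List.pyGet?_of_nonneg _ h0]
      exact List.getElem?_append_left (by omega)
    simp only [pvABack, hget]
    cases PySem.List.pyGet? s i with
    | none => rfl
    | some ch =>
      by_cases hc : ch = '-' <;> simp [hc, ih (fun j hj => h j (by simp [hj]))]
theorem pvABack_eq (s : List Char) :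
    pvABack s (PySem.List.pyRange ((s.length : Int) - 1) (-1) (-1))
      = (pvBLast s).map (fun n => (n : Int)) := by
  induction s using List.reverseRecOn with
  | nil => simp [pvABack, pvBLast]
  | append_singleton t x ih =>
    have hlen : ((t ++ [x]).length : Int) - 1 = (t.length : Int) := by simp
    rw [hlen, PySem.List.pyRange_neg_one_cons (by omega)]
    have hget : PySem.List.pyGet? (t ++ [x]) (t.length : Int) = some x :=
      PySem.List.pyGet?_append_length t [] x
    simp only [pvABack, hget]
    by_cases hx : x = '-'
    · subst hx
      norm_num
      have hc := pvABack_congr (PySem.List.pyRange ((t.length : Int) - 1) (-1) (-1)) t ['-']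
        (fun i hi => by rw [PySem.List.mem_pyRange_neg_one] at hi; exact ⟨by omega, by omega⟩)
      rw [hc, ih]
      simp only [pvBLast, List.reverse_append, List.reverse_singleton, List.singleton_append,
        List.findIdx?_cons]
      norm_num
      cases hfi : List.findIdx? (fun ch => !decide (ch = '-')) t.reverse with
      | none => simp
      | some n => simp; omega
    · simp [pvBLast, List.findIdx?_cons, hx]
def pvM (xy : Char × Char) : Int := if xy.1 = xy.2 then 1 else 0
def pvSum (l : List (Char × Char)) : Int := (l.map pvM).sum
def pvPrefs : List (Char × Char) → Int → List Int
  | [], _ => []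
  | xy :: t, acc => (acc + pvM xy) :: pvPrefs t (acc + pvM xy)
def pvSufs : List (Char × Char) → List Int
  | [] => []
  | _ :: t => pvSum t :: pvSufs t

theorem pvBLast_lt (l : List Char) (e : Nat) (h : pvBLast l = some e) : e < l.length := by
  unfold pvBLast at h
  cases hfi : List.findIdx? (fun ch => ch ≠ '-') l.reverse with
  | none => rw [hfi] at h; simp at h
  | some r =>
    rw [hfi] at h
    have := (List.findIdx?_eq_some_iff_findIdx_eq.mp hfi).1
    simp at h this
    omega

theorem pvLoop1_eq (bl cl q : List Char) (acc : Int) (hlen : bl.length = cl.length) :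
    (PySem.List.enumerate bl (q.length : Int)).foldl (pvAStep1 (q ++ cl)) acc
      = acc + pvSum (bl.zip cl) := by
  induction bl generalizing cl q acc with
  | nil => simp [pvSum]
  | cons y bl' ih =>
    cases cl with
    | nil => simp at hlen
    | cons z cl' =>
      rw [PySem.List.enumerate_cons]
      simp only [List.foldl_cons]
      have hstep : pvAStep1 (q ++ z :: cl') acc ((q.length : Int), y)
          = acc + pvM (y, z) := by
        simp only [pvAStep1, PySem.List.pyGet?_append_length, pvM]
        by_cases h : y = z <;> simp [h]
      rw [hstep]
      have hq : ((q.length : Int) + 1) = (((q ++ [z]).length : Nat) : Int) := by simp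
      rw [hq]
      have := ih cl' (q ++ [z]) (acc + pvM (y, z)) (by simpa using hlen)
      rw [List.append_assoc] at this
      simp only [List.singleton_append] at this
      rw [this]
      simp [pvSum]
      ring
theorem pvPref_fold (l : List (Char × Char)) (acc : Int) (init : List Int) :
    l.foldl pvBStepPref (acc, init) = (acc + pvSum l, init ++ pvPrefs l acc) := by
  induction l generalizing acc init with
  | nil => simp [pvSum, pvPrefs]
  | cons xy t ih =>
    simp only [List.foldl_cons, pvBStepPref, pvPrefs]
    rw [show (acc + (if xy.1 = xy.2 then (1:Int) else 0)) = acc + pvM xy from rfl, ih]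
    simp [pvSum]
    ring

theorem pvSuf_fold (l : List (Char × Char)) :
    l.reverse.foldl pvBStepSuf ((0 : Int), ([] : List Int))
      = (pvSum l, (pvSufs l).reverse) := by
  induction l with
  | nil => simp [pvSum, pvSufs]
  | cons xy t ih =>
    rw [List.reverse_cons, List.foldl_append, ih]
    simp only [List.foldl_cons, List.foldl_nil, pvBStepSuf, pvSufs, pvSum]
    simp only [pvM, List.map_cons, List.sum_cons, List.reverse_cons, Prod.mk.injEq]
    exact ⟨Int.add_comm _ _, trivial⟩
theorem pvMain (al bl cl p q : List Char) (h1 : al.length = bl.length) (h2 : bl.length = cl.length)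
    (hq : q.length = p.length) (pAcc high pos : Int) :
    ((PySem.List.enumerate al (p.length : Int)).foldl (pvAStep2 (p ++ bl) (q ++ cl))
        (pAcc + pvSum (bl.zip cl), high, pos)).2
      = (PySem.List.enumerate ((pvPrefs (al.zip cl) pAcc).zip (pvSufs (bl.zip cl))) (p.length : Int)).foldl
          pvBStepMax (high, pos) := by
  induction al generalizing bl cl p q pAcc high pos with
  | nil => simp [pvPrefs]
  | cons x al' ih =>
    cases bl with
    | nil => simp at h1
    | cons y bl' =>
      cases cl with
      | nil => simp at h2
      | cons z cl' =>
        rw [PySem.List.enumerate_cons]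
        simp only [List.zip_cons_cons, pvPrefs, pvSufs, List.zip_cons_cons,
          PySem.List.enumerate_cons, List.foldl_cons]
        have hgb : PySem.List.pyGet? (p ++ y :: bl') (p.length : Int) = some y :=
          PySem.List.pyGet?_append_length p bl' y
        have hgc : PySem.List.pyGet? (q ++ z :: cl') (p.length : Int) = some z := by
          rw [← hq]; exact PySem.List.pyGet?_append_length q cl' z
        have hstep : pvAStep2 (p ++ y :: bl') (q ++ z :: cl')
            (pAcc + pvSum ((y, z) :: bl'.zip cl'), high, pos) ((p.length : Int), x)
            = (pAcc + pvM (x, z) + pvSum (bl'.zip cl'),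
                if pAcc + pvM (x, z) + pvSum (bl'.zip cl') ≥ high
                then (pAcc + pvM (x, z) + pvSum (bl'.zip cl'), (p.length : Int))
                else (high, pos)) := by
          simp only [pvAStep2, hgb, hgc, pvSum, pvM, List.map_cons, List.sum_cons]
          by_cases hyz : y = z <;> by_cases hxz : x = z <;>
            simp [hyz, hxz] <;> split_ifs with hge <;>
            first
              | rfl
              | trivial
              | (exfalso; omega)
              | (refine Prod.ext ?_ ?_ <;> simp <;> ring)
        rw [hstep]
        simp only [pvBStepMax]
        have hlen' : ((p.length : Int) + 1) = (((p ++ [y]).length : Nat) : Int) := by simp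
        have hih := fun (high' pos' : Int) => ih bl' cl' (p ++ [y]) (q ++ [z])
          (by simpa using h1) (by simpa using h2) (by simp [hq])
          (pAcc + pvM (x, z)) high' pos'
        simp only [List.append_assoc, List.singleton_append] at hih
        by_cases hcond : pAcc + pvM (x, z) + pvSum (bl'.zip cl') ≥ high
        · rw [if_pos hcond, hlen']
          exact hih _ _
        · rw [if_neg hcond, hlen']
          exact hih _ _
theorem pvBLast_isSome (l : List Char) (h : (pvBFirst l).isSome = true) :
    (pvBLast l).isSome = true := by
  simp only [pvBFirst, pvBLast, Option.isSome_map] at *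
  rwa [List.findIdx?_isSome, List.any_reverse, ← List.findIdx?_isSome]

theorem pvEquiv (a b c : String)
    (hpre : (pvBFirst a.toList).isSome = true ∧ (pvBFirst b.toList).isSome = true ∧
      max ((pvBFirst a.toList).getD 0) ((pvBFirst b.toList).getD 0)
        ≤ min ((pvBLast a.toList).getD 0) ((pvBLast b.toList).getD 0) ∧
      min ((pvBLast a.toList).getD 0) ((pvBLast b.toList).getD 0) < c.toList.length) :
    calculate_split a b c = calculate_split_alt a b c := by
  obtain ⟨hfa', hfb', hord, hclen⟩ := hpre
  obtain ⟨fa, hfa⟩ := Option.isSome_iff_exists.mp hfa'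
  obtain ⟨fb, hfb⟩ := Option.isSome_iff_exists.mp hfb'
  obtain ⟨la, hla⟩ := Option.isSome_iff_exists.mp (pvBLast_isSome _ hfa')
  obtain ⟨lb, hlb⟩ := Option.isSome_iff_exists.mp (pvBLast_isSome _ hfb')
  simp only [hfa, hfb, hla, hlb, Option.getD_some] at hord hclen
  have hfa2 : List.findIdx? (fun ch => ch ≠ '-') a.toList = some fa := hfa
  have hfb2 : List.findIdx? (fun ch => ch ≠ '-') b.toList = some fb := hfb
  -- A's scans agree with B's helpers
  have hA1 : pvAFirst a.toList 0 = some ((fa : Int)) := by rw [pvAFirst_eq, hfa2]; simp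
  have hB1 : pvAFirst b.toList 0 = some ((fb : Int)) := by rw [pvAFirst_eq, hfb2]; simp
  have hA2 : pvABack a.toList (PySem.List.pyRange ((a.toList.length : Int) - 1) (-1) (-1))
      = some ((la : Int)) := by rw [pvABack_eq, hla]; rfl
  have hB2 : pvABack b.toList (PySem.List.pyRange ((b.toList.length : Int) - 1) (-1) (-1))
      = some ((lb : Int)) := by rw [pvABack_eq, hlb]; rfl
  have hlalt : la < a.toList.length := pvBLast_lt _ _ hla
  have hlblt : lb < b.toList.length := pvBLast_lt _ _ hlb
  simp only [calculate_split, calculate_split_alt, pvGetStartEnd, hA1, hA2, hB1, hB2,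
    hfa, hfb, hla, hlb]
  rw [if_neg (by omega)]
  -- name the three overlap slices
  set aov := PySem.List.slice a.toList (some (max (fa:Int) (fb:Int))) (some (min (la:Int) (lb:Int) + 1)) with haov
  set bov := PySem.List.slice b.toList (some (max (fa:Int) (fb:Int))) (some (min (la:Int) (lb:Int) + 1)) with hbov
  set cov := PySem.List.slice c.toList (some (max (fa:Int) (fb:Int))) (some (min (la:Int) (lb:Int) + 1)) with hcov
  have hst : (max (fa:Int) (fb:Int)) = ((max fa fb : Nat) : Int) := by push_cast; rfl
  have hen1 : (min (la:Int) (lb:Int) + 1) = ((min la lb + 1 : Nat) : Int) := by push_cast; rfl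
  have hlaov : aov.length = min la lb + 1 - max fa fb := by
    rw [haov, hst, hen1, PySem.List.slice_natCast]
    simp only [List.length_take, List.length_drop]
    omega
  have hlbov : bov.length = min la lb + 1 - max fa fb := by
    rw [hbov, hst, hen1, PySem.List.slice_natCast]
    simp only [List.length_take, List.length_drop]
    omega
  have hlcov : cov.length = min la lb + 1 - max fa fb := by
    rw [hcov, hst, hen1, PySem.List.slice_natCast]
    simp only [List.length_take, List.length_drop]
    omega
  have h1 : aov.length = bov.length := by omega
  have h2 : bov.length = cov.length := by omega
  have hbase := pvLoop1_eq bov cov [] 0 h2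
  simp only [List.length_nil, Nat.cast_zero, List.nil_append] at hbase
  rw [hbase]
  have hpref := pvPref_fold (aov.zip cov) 0 []
  have hsuf := pvSuf_fold (bov.zip cov)
  rw [hpref, hsuf]
  simp only [List.nil_append, List.reverse_reverse, zero_add]
  have hmain := pvMain aov bov cov [] [] h1 h2 rfl 0 (pvSum (bov.zip cov)) 0
  simp only [List.length_nil, Nat.cast_zero, List.nil_append, zero_add] at hmain
  rw [hmain]

-- ===== VERDICT (by name: the statement is the Claim_ definition above) =====
theorem calculate_split_spec : Claim_equal_calculate_split := by
  intro sequence_a sequence_b comparison_sequence _ hpre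
  unfold Spec_calculate_split
  exact pvEquiv sequence_a sequence_b comparison_sequence hpre
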